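-- pv_equiv track=rewrite | github.com/sashaaero/binarysearch-problems | problems/medium/curr.py | solve
-- ===== SOURCE A (Python) =====
-- def solve(n):
--     arr = list(map(int, str(n)))
--     last = len(arr)
--
--     for i in range(len(arr) - 2, -1, -1):
--         if arr[i] > arr[i + 1]:
--             arr[i] -= 1
--             last = i + 1
--
--     arr[last:] = [9] * (len(arr) - last)
--
--     return int("".join(map(str, arr)))
-- ===== SOURCE B (Python) =====
-- def solve(n):
--     d = list(map(int, str(n)))
--     i = 0
--     while i + 1 < len(d) and d[i] <= d[i + 1]:
--         i += 1
--     if i + 1 < len(d):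
--         # first monotonicity break at i; back up over the run of equal digits
--         while i > 0 and d[i - 1] == d[i]:
--             i -= 1
--         d[i] -= 1
--         d[i + 1:] = [9] * (len(d) - i - 1)
--     return int("".join(map(str, d)))
-- ===== Notes on version B (the rewrite author's own statement) =====
-- stated objective: alternative
-- what changed: A sweeps the digits right-to-left decrementing every digit that exceeds its (already-adjusted) successor; B makes one forward scan to the first monotonicity break, backs up over the run of equal digits, decrements that single digit once and fills 9s.
import Mathlib
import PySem

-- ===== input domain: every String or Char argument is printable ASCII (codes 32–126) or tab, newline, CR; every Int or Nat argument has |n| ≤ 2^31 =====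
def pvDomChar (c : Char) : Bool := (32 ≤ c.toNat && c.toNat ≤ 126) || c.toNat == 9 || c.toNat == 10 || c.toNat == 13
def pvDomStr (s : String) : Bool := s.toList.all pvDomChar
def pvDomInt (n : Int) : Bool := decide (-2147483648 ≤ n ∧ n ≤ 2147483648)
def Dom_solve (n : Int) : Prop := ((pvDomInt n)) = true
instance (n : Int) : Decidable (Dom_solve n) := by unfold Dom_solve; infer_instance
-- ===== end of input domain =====

-- B changes the decomposition: a single forward scan to the first monotone break plus a left
-- walk over the equal run, instead of A's right-to-left cascade of decrements; same cost.

-- list(map(int, str(n))): exact for n ≥ 0 (Pre_), where every char of str(n) is a digit '0'-'9'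
def pvDigits (n : Int) : List Int := (PySem.Int.toChars n).map (fun c => ((c.toNat : Int) - 48))

-- int("".join(map(str, arr))): exact when every entry is a single digit 0..9 (holds in both ports)
def pvJoinInt (arr : List Int) : Int := arr.foldl (fun a d => a * 10 + d) 0

-- ===== PORT A =====
-- for i in range(len(arr)-2, -1, -1): …   (fuel i+1 means index i is processed next)
def pvLoopA : List Int → Nat → Nat → List Int × Nat
  | arr, last, 0 => (arr, last)
  | arr, last, (i+1) =>
    if arr.getD i 0 > arr.getD (i+1) 0 then
      pvLoopA (arr.set i (arr.getD i 0 - 1)) (i+1) i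
    else
      pvLoopA arr last i

def solve (n : Int) : Int :=
  let arr := pvDigits n
  let p := pvLoopA arr arr.length (arr.length - 1)
  pvJoinInt (p.1.take p.2 ++ List.replicate (p.1.length - p.2) 9)

-- ===== PORT B =====
-- while i + 1 < len(d) and d[i] <= d[i+1]: i += 1
def pvScan (d : List Int) (i : Nat) : Nat :=
  if h : i + 1 < d.length ∧ d.getD i 0 ≤ d.getD (i+1) 0 then pvScan d (i+1) else i
termination_by d.length - i
decreasing_by omega

-- while i > 0 and d[i-1] == d[i]: i -= 1
def pvWalk (d : List Int) : Nat → Nat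
  | 0 => 0
  | (i+1) => if d.getD i 0 = d.getD (i+1) 0 then pvWalk d i else i+1

def solve_alt (n : Int) : Int :=
  let d := pvDigits n
  let i := pvScan d 0
  if i + 1 < d.length then
    let m := pvWalk d i
    let d2 := d.set m (d.getD m 0 - 1)
    pvJoinInt (d2.take (m+1) ++ List.replicate (d.length - m - 1) 9)
  else
    pvJoinInt d

-- ===== PRECONDITION & SPEC =====
-- Pre_ excludes n < 0, where str(n) starts with '-' and both A and B raise ValueError in int('-')
def Pre_solve (n : Int) : Prop := 0 ≤ n
instance (n : Int) : Decidable (Pre_solve n) := by unfold Pre_solve; infer_instance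
def pvWitness_solve : Int := 1534330

def Spec_solve (n : Int) (out : Int) : Prop := out = solve_alt n
instance (n : Int) (out : Int) : Decidable (Spec_solve n out) := by unfold Spec_solve; infer_instance

-- ===== CLAIM (what is proved, stated in full; the proofs are below) =====
def Claim_equal_solve : Prop := ∀ (n : Int), Dom_solve n → Pre_solve n → Spec_solve n (solve n)

-- ===== LEMMAS AND PROOFS =====

-- trig d i: A's backward pass decrements index i (propagates left through equal digits from a strict descent)
def pvTrig (d : List Int) (i : Nat) : Bool :=
  if h : i + 1 < d.length then
    (decide (d.getD i 0 > d.getD (i+1) 0)) ||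
      (pvTrig d (i+1) && decide (d.getD i 0 = d.getD (i+1) 0))
  else false
termination_by d.length - i
decreasing_by omega

-- d with every triggered index ≥ f decremented
def pvPatch (d : List Int) (f : Nat) : List Int :=
  d.mapIdx (fun j x => if f ≤ j ∧ pvTrig d j then x - 1 else x)

-- the value of `last` after processing indices f-1 … 0
def pvLastSpec (d : List Int) : Nat → Nat → Nat
  | 0, last => last
  | (i+1), last => pvLastSpec d i (if pvTrig d i then i + 1 else last)

theorem pvTrig_false_of_le (d : List Int) (j : Nat) (h : d.length ≤ j + 1) : pvTrig d j = false := by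
  rw [pvTrig]; simp [Nat.not_lt.mpr h]

theorem pvPatch_length (d : List Int) (f : Nat) : (pvPatch d f).length = d.length := by
  simp [pvPatch]

theorem getD_pvPatch (d : List Int) (f j : Nat) :
    (pvPatch d f).getD j 0 = if f ≤ j ∧ pvTrig d j then d.getD j 0 - 1 else d.getD j 0 := by
  rw [List.getD_eq_getElem?_getD, List.getD_eq_getElem?_getD]
  unfold pvPatch
  rw [List.getElem?_mapIdx]
  by_cases hj : j < d.length
  · rw [List.getElem?_eq_getElem hj]
    simp only [Option.map_some, Option.getD_some]
  · rw [List.getElem?_eq_none (by omega)]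
    have := pvTrig_false_of_le d j (by omega)
    simp [this]

theorem pvPatch_eq_self (d : List Int) (f : Nat) (h : ∀ j, f ≤ j → pvTrig d j = false) :
    pvPatch d f = d := by
  apply List.ext_getElem?
  intro j
  unfold pvPatch
  rw [List.getElem?_mapIdx]
  by_cases hj : j < d.length
  · rw [List.getElem?_eq_getElem hj]
    by_cases hf : f ≤ j
    · simp [h j hf]
    · simp [hf]
  · rw [List.getElem?_eq_none (by omega)]; rfl

theorem pvLoopA_eq (d : List Int) : ∀ f, f + 1 ≤ d.length → ∀ last,
    pvLoopA (pvPatch d f) last f = (pvPatch d 0, pvLastSpec d f last) := by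
  intro f
  induction f with
  | zero => intro _ last; rfl
  | succ i ih =>
    intro hf last
    have hi1 : i + 1 < d.length := by omega
    have hA : (pvPatch d (i+1)).getD i 0 = d.getD i 0 := by
      rw [getD_pvPatch]; simp
    have hB : (pvPatch d (i+1)).getD (i+1) 0
        = if pvTrig d (i+1) then d.getD (i+1) 0 - 1 else d.getD (i+1) 0 := by
      rw [getD_pvPatch]; simp
    have htrig : pvTrig d i
        = ((decide (d.getD i 0 > d.getD (i+1) 0)) ||
           (pvTrig d (i+1) && decide (d.getD i 0 = d.getD (i+1) 0))) := by
      rw [pvTrig]; simp [hi1]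
    have hcond : ((pvPatch d (i+1)).getD i 0 > (pvPatch d (i+1)).getD (i+1) 0) ↔ pvTrig d i = true := by
      rw [hA, hB, htrig]
      by_cases ht : pvTrig d (i+1) = true <;> simp [ht]
      omega
    rw [pvLoopA]
    by_cases hc : (pvPatch d (i+1)).getD i 0 > (pvPatch d (i+1)).getD (i+1) 0
    · have ht : pvTrig d i = true := hcond.mp hc
      rw [if_pos hc]
      have hset : (pvPatch d (i+1)).set i ((pvPatch d (i+1)).getD i 0 - 1) = pvPatch d i := by
        apply List.ext_getElem?
        intro j
        rw [List.getElem?_set]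
        by_cases hij : i = j
        · subst hij
          rw [if_pos rfl, if_pos (by rw [pvPatch_length]; omega)]
          rw [hA]
          unfold pvPatch
          rw [List.getElem?_mapIdx, List.getElem?_eq_getElem (by omega)]
          simp [ht, List.getD_eq_getElem?_getD, List.getElem?_eq_getElem (show i < d.length by omega)]
        · rw [if_neg hij]
          unfold pvPatch
          rw [List.getElem?_mapIdx, List.getElem?_mapIdx]
          by_cases hj : j < d.length
          · rw [List.getElem?_eq_getElem hj]
            have : (i + 1 ≤ j ∧ pvTrig d j = true) ↔ (i ≤ j ∧ pvTrig d j = true) := by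
              constructor
              · rintro ⟨h1, h2⟩; exact ⟨by omega, h2⟩
              · rintro ⟨h1, h2⟩; exact ⟨by omega, h2⟩
            simp only [Option.map_some]
            congr 1
            rw [if_congr this rfl rfl]
          · rw [List.getElem?_eq_none (by omega)]; rfl
      rw [hset]
      have := ih (by omega) (i+1)
      rw [this]
      have : pvLastSpec d (i+1) last = pvLastSpec d i (i+1) := by
        rw [pvLastSpec]; rw [if_pos ht]
      rw [this]
    · have ht : pvTrig d i = false := by
        cases h : pvTrig d i
        · rfl
        · exact absurd (hcond.mpr h) hc
      rw [if_neg hc]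
      have hsame : pvPatch d (i+1) = pvPatch d i := by
        apply List.ext_getElem?
        intro j
        unfold pvPatch
        rw [List.getElem?_mapIdx, List.getElem?_mapIdx]
        by_cases hj : j < d.length
        · rw [List.getElem?_eq_getElem hj]
          simp only [Option.map_some]
          congr 1
          by_cases hij : i = j
          · subst hij; simp [ht]
          · have hiff : (i + 1 ≤ j ∧ pvTrig d j = true) ↔ (i ≤ j ∧ pvTrig d j = true) := by
              constructor
              · rintro ⟨h1, h2⟩; exact ⟨by omega, h2⟩
              · rintro ⟨h1, h2⟩; exact ⟨by omega, h2⟩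
            rw [if_congr hiff rfl rfl]
        · rw [List.getElem?_eq_none (by omega)]; rfl
      rw [hsame, ih (by omega) last]
      have : pvLastSpec d (i+1) last = pvLastSpec d i last := by
        rw [pvLastSpec, if_neg (by simp [ht])]
      rw [this]

theorem pvLastSpec_const (d : List Int) : ∀ f last, (∀ k, k < f → pvTrig d k = false) →
    pvLastSpec d f last = last := by
  intro f
  induction f with
  | zero => intro last _; rfl
  | succ i ih =>
    intro last h
    rw [pvLastSpec, if_neg (by simp [h i (by omega)])]
    exact ih last (fun k hk => h k (by omega))

theorem pvLastSpec_least (d : List Int) (m : Nat) (hm : pvTrig d m = true)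
    (hmin : ∀ k, k < m → pvTrig d k = false) :
    ∀ f last, m < f → pvLastSpec d f last = m + 1 := by
  intro f
  induction f with
  | zero => omega
  | succ i ih =>
    intro last hmf
    by_cases hmi : m < i
    · rw [pvLastSpec]; exact ih _ hmi
    · have : m = i := by omega
      subst this
      rw [pvLastSpec, if_pos hm]
      exact pvLastSpec_const d m (m+1) hmin

theorem pvScan_spec (d : List Int) : ∀ fuel i, d.length - i ≤ fuel → i < d.length →
    i ≤ pvScan d i ∧ pvScan d i < d.length ∧
    (∀ k, i ≤ k → k < pvScan d i → d.getD k 0 ≤ d.getD (k+1) 0) ∧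
    (pvScan d i + 1 < d.length → d.getD (pvScan d i) 0 > d.getD (pvScan d i + 1) 0) := by
  intro fuel
  induction fuel with
  | zero => intro i h1 h2; omega
  | succ f ih =>
    intro i h1 h2
    rw [pvScan]
    by_cases hc : i + 1 < d.length ∧ d.getD i 0 ≤ d.getD (i+1) 0
    · rw [dif_pos hc]
      obtain ⟨ha, hb, hrun, hbrk⟩ := ih (i+1) (by omega) (by omega)
      refine ⟨by omega, hb, ?_, hbrk⟩
      intro k hk1 hk2
      by_cases hki : k = i
      · subst hki; exact hc.2
      · exact hrun k (by omega) hk2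
    · rw [dif_neg hc]
      refine ⟨le_refl i, h2, by omega, ?_⟩
      intro h3
      rcases not_and_or.mp hc with h | h
      · omega
      · omega

theorem pvWalk_spec (d : List Int) : ∀ i, pvWalk d i ≤ i ∧
    (∀ k, pvWalk d i ≤ k → k < i → d.getD k 0 = d.getD (k+1) 0) ∧
    (0 < pvWalk d i → d.getD (pvWalk d i - 1) 0 ≠ d.getD (pvWalk d i) 0) := by
  intro i
  induction i with
  | zero => refine ⟨?_, ?_, ?_⟩ <;> simp [pvWalk]
  | succ i ih =>
    rw [pvWalk]
    by_cases hc : d.getD i 0 = d.getD (i+1) 0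
    · rw [if_pos hc]
      obtain ⟨h1, h2, h3⟩ := ih
      refine ⟨by omega, ?_, h3⟩
      intro k hk1 hk2
      by_cases hki : k = i
      · subst hki; exact hc
      · exact h2 k hk1 (by omega)
    · rw [if_neg hc]
      exact ⟨le_refl _, by omega, fun _ => by simpa using hc⟩

theorem pvTrig_descent (d : List Int) : ∀ fuel k, d.length - k ≤ fuel → pvTrig d k = true →
    ∃ t, k ≤ t ∧ t + 1 < d.length ∧ d.getD t 0 > d.getD (t+1) 0 := by
  intro fuel
  induction fuel with
  | zero =>
    intro k h1 h2
    have : d.length ≤ k + 1 := by omega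
    rw [pvTrig_false_of_le d k this] at h2; exact absurd h2 (by simp)
  | succ f ih =>
    intro k h1 h2
    by_cases hk : k + 1 < d.length
    · rw [pvTrig] at h2
      rw [dif_pos hk] at h2
      rcases Bool.or_eq_true_iff.mp h2 with h | h
      · exact ⟨k, le_refl k, hk, by simpa using h⟩
      · obtain ⟨t, ht1, ht2, ht3⟩ := ih (k+1) (by omega) (Bool.and_eq_true_iff.mp h).1
        exact ⟨t, by omega, ht2, ht3⟩
    · rw [pvTrig_false_of_le d k (by omega)] at h2; exact absurd h2 (by simp)

theorem pvTrig_run (d : List Int) (m j : Nat) (hb : j + 1 < d.length)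
    (hdesc : d.getD j 0 > d.getD (j+1) 0)
    (hrun : ∀ k, m ≤ k → k < j → d.getD k 0 = d.getD (k+1) 0) (hmj : m ≤ j) :
    ∀ t, t ≤ j - m → pvTrig d (j - t) = true := by
  intro t
  induction t with
  | zero =>
    intro _
    rw [Nat.sub_zero, pvTrig, dif_pos hb]
    simp only [Bool.or_eq_true, Bool.and_eq_true, decide_eq_true_eq]
    exact Or.inl hdesc
  | succ t ih =>
    intro ht
    have hk1 : j - (t+1) + 1 = j - t := by omega
    have hklen : j - (t+1) + 1 < d.length := by omega
    rw [pvTrig, dif_pos hklen]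
    have heq : d.getD (j - (t+1)) 0 = d.getD (j - (t+1) + 1) 0 :=
      hrun _ (by omega) (by omega)
    have htr : pvTrig d (j - (t+1) + 1) = true := by rw [hk1]; exact ih (by omega)
    simp only [Bool.or_eq_true, Bool.and_eq_true, decide_eq_true_eq]
    exact Or.inr ⟨htr, heq⟩

theorem pvTrig_below (d : List Int) (m j : Nat) (hj : j < d.length) (hmj : m ≤ j)
    (hscan : ∀ k, k < j → d.getD k 0 ≤ d.getD (k+1) 0)
    (hstop : 0 < m → d.getD (m-1) 0 ≠ d.getD m 0) :
    ∀ t k, m ≤ k + t → k < m → pvTrig d k = false := by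
  intro t
  induction t with
  | zero => intro k h1 h2; omega
  | succ t ih =>
    intro k h1 h2
    have hklen : k + 1 < d.length := by omega
    rw [pvTrig, dif_pos hklen]
    have h3 : ¬ d.getD k 0 > d.getD (k+1) 0 := by
      have := hscan k (by omega); omega
    by_cases hkm : k + 1 = m
    · have : d.getD k 0 ≠ d.getD (k+1) 0 := by
        have := hstop (by omega)
        have hmk : m - 1 = k := by omega
        rw [hmk] at this
        rw [show k + 1 = m from hkm]
        exact this
      rw [decide_eq_false h3, decide_eq_false this]
      simp
    · have := ih (k+1) (by omega) (by omega)
      rw [decide_eq_false h3, this]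
      simp

theorem pvMain' (d : List Int) :
    pvJoinInt ((pvLoopA d d.length (d.length-1)).1.take (pvLoopA d d.length (d.length-1)).2 ++
      List.replicate ((pvLoopA d d.length (d.length-1)).1.length - (pvLoopA d d.length (d.length-1)).2) 9) =
    (if pvScan d 0 + 1 < d.length then
      pvJoinInt ((d.set (pvWalk d (pvScan d 0)) (d.getD (pvWalk d (pvScan d 0)) 0 - 1)).take (pvWalk d (pvScan d 0) + 1) ++
        List.replicate (d.length - pvWalk d (pvScan d 0) - 1) 9)
    else pvJoinInt d) := by
  by_cases hlen : d.length = 0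
  · have hd : d = [] := List.eq_nil_of_length_eq_zero hlen
    subst hd
    rw [pvScan]
    simp [pvLoopA, pvJoinInt]
  · have hpos : 0 < d.length := by omega
    have hloop : pvLoopA d d.length (d.length - 1) = (pvPatch d 0, pvLastSpec d (d.length - 1) d.length) := by
      have h := pvLoopA_eq d (d.length - 1) (by omega) d.length
      rwa [pvPatch_eq_self d (d.length - 1) (fun j hj => pvTrig_false_of_le d j (by omega))] at h
    obtain ⟨hj0, hjlen, hrunscan, hbrk⟩ := pvScan_spec d d.length 0 (by omega) hpos
    by_cases hb : pvScan d 0 + 1 < d.length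
    · rw [if_pos hb]
      have hdesc := hbrk hb
      obtain ⟨hwle, hwrun, hwstop⟩ := pvWalk_spec d (pvScan d 0)
      have htrigm : pvTrig d (pvWalk d (pvScan d 0)) = true := by
        have := pvTrig_run d (pvWalk d (pvScan d 0)) (pvScan d 0) hb hdesc hwrun hwle
          (pvScan d 0 - pvWalk d (pvScan d 0)) (le_refl _)
        rwa [Nat.sub_sub_self hwle] at this
      have hbelow : ∀ k, k < pvWalk d (pvScan d 0) → pvTrig d k = false := fun k hk =>
        pvTrig_below d (pvWalk d (pvScan d 0)) (pvScan d 0) hjlen hwle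
          (fun k' hk' => hrunscan k' (by omega) hk') hwstop (pvWalk d (pvScan d 0) - k) k (by omega) hk
      have hm1 : pvWalk d (pvScan d 0) + 1 < d.length := by omega
      have hlast : pvLastSpec d (d.length - 1) d.length = pvWalk d (pvScan d 0) + 1 :=
        pvLastSpec_least d _ htrigm hbelow _ _ (by omega)
      rw [hloop]
      simp only [hlast, pvPatch_length]
      have htake : (pvPatch d 0).take (pvWalk d (pvScan d 0) + 1) =
          (d.set (pvWalk d (pvScan d 0)) (d.getD (pvWalk d (pvScan d 0)) 0 - 1)).take (pvWalk d (pvScan d 0) + 1) := by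
        apply List.ext_getElem?
        intro k
        rw [List.getElem?_take, List.getElem?_take]
        by_cases hk : k < pvWalk d (pvScan d 0) + 1
        · rw [if_pos hk, if_pos hk]
          unfold pvPatch
          rw [List.getElem?_mapIdx, List.getElem?_set]
          by_cases hkm : pvWalk d (pvScan d 0) = k
          · subst hkm
            rw [if_pos rfl, if_pos (by omega)]
            rw [List.getElem?_eq_getElem (show pvWalk d (pvScan d 0) < d.length by omega)]
            simp only [Option.map_some]
            rw [if_pos ⟨Nat.zero_le _, htrigm⟩]
            rw [List.getD_eq_getElem?_getD, List.getElem?_eq_getElem (show pvWalk d (pvScan d 0) < d.length by omega)]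
            rfl
          · rw [if_neg hkm]
            by_cases hkd : k < d.length
            · rw [List.getElem?_eq_getElem hkd]
              simp only [Option.map_some]
              rw [if_neg (by rintro ⟨-, h2⟩; exact absurd h2 (by simp [hbelow k (by omega)]))]
            · rw [List.getElem?_eq_none (by omega)]; rfl
        · rw [if_neg hk, if_neg hk]
      rw [htake, Nat.sub_sub]
    · rw [if_neg hb]
      have hjend : pvScan d 0 = d.length - 1 := by omega
      have hnotrig : ∀ k, pvTrig d k = false := by
        intro k
        cases h : pvTrig d k
        · rfl
        · exfalso
          obtain ⟨t, ht1, ht2, ht3⟩ := pvTrig_descent d d.length k (by omega) h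
          have := hrunscan t (by omega) (by omega)
          omega
      have hlast : pvLastSpec d (d.length - 1) d.length = d.length :=
        pvLastSpec_const d _ _ (fun k _ => hnotrig k)
      rw [hloop]
      simp only [hlast, pvPatch_length]
      rw [pvPatch_eq_self d 0 (fun j _ => hnotrig j)]
      rw [List.take_of_length_le (le_refl _), Nat.sub_self, List.replicate_zero, List.append_nil]

-- ===== VERDICT (by name: the statement is the Claim_ definition above) =====
theorem solve_spec : Claim_equal_solve := by
  intro n _ _
  unfold Spec_solve solve solve_alt
  exact pvMain' (pvDigits n)
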